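-- pv_equiv track=rewrite | github.com/cristianpl99/tp-intro-progra | funcionesVACIAS.py | puntos
-- ===== SOURCE A (Python) =====
-- def puntos(candidata):
--     #devuelve el puntaje que le corresponde a candidata
--     puntaje = 0
--     for e in candidata.lower():
--         if e < "a" or e > "z" :
--             puntaje = 0
--             return puntaje
--
--     for e in candidata.lower():
--         if e in "aeiou":
--             puntaje = puntaje + 1
--         else:
--             if e in "jkqwxyz":
--                 puntaje = puntaje + 5
--             else:
--                 puntaje = puntaje + 2
--
--     return puntaje
-- ===== SOURCE B (Python) =====
-- def puntos(candidata):
--     # Histogram the lowercased string once, then score per DISTINCT letter: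
--     # weight(letter) * multiplicity; an un-scorable character (outside a-z) yields 0.
--     freq = {}
--     for c in candidata.lower():
--         freq[c] = freq.get(c, 0) + 1
--     total = 0
--     for c, n in freq.items():
--         if c in "aeiou":
--             w = 1
--         elif c in "jkqwxyz":
--             w = 5
--         elif "a" <= c <= "z":
--             w = 2
--         else:
--             return 0
--         total += w * n
--     return total
-- ===== Notes on version B (the rewrite author's own statement) =====
-- stated objective: alternative
-- what changed: B builds a character-frequency dict in one pass and then scores per distinct letter (weight times multiplicity, with validation folded into the weight lookup), instead of A's separate validation loop plus per-character if/elif accumulation over the whole string.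
import Mathlib
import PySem

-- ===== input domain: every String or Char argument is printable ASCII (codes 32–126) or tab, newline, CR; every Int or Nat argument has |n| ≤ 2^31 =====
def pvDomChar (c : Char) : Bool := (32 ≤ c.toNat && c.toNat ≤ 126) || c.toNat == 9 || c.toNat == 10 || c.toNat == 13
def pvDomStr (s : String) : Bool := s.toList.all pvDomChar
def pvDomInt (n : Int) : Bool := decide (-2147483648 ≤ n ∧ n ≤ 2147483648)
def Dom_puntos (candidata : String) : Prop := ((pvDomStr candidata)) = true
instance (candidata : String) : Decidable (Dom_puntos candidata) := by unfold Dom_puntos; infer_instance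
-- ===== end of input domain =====

-- B builds a character-frequency dict in one pass and scores per DISTINCT letter
-- (weight × multiplicity, validation folded into the weight lookup) instead of A's
-- validation loop plus per-character if/elif accumulation (alternative algorithm, same cost).

-- ===== PORT A =====
-- first loop: returns some 0 on the first char outside 'a'..'z', none if the loop finishes
def puntosLoop1 : List Char → Option Int
  | [] => none
  | c :: rest => if c < 'a' ∨ c > 'z' then some 0 else puntosLoop1 rest

-- second loop: per-character accumulation with weights 1 / 5 / 2
def puntosLoop2 : Int → List Char → Int
  | p, [] => p
  | p, c :: rest =>
      if c ∈ ['a', 'e', 'i', 'o', 'u'] then puntosLoop2 (p + 1) rest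
      else if c ∈ ['j', 'k', 'q', 'w', 'x', 'y', 'z'] then puntosLoop2 (p + 5) rest
      else puntosLoop2 (p + 2) rest

def puntos (candidata : String) : Int :=
  match puntosLoop1 (PySem.Str.lower candidata).toList with
  | some r => r
  | none => puntosLoop2 0 (PySem.Str.lower candidata).toList

-- ===== PORT B =====
-- weight of one distinct character: the if/elif chain of Source B; none = Source B's 'return 0'
def puntosWeight (c : Char) : Option Int :=
  if c ∈ ['a', 'e', 'i', 'o', 'u'] then some 1
  else if c ∈ ['j', 'k', 'q', 'w', 'x', 'y', 'z'] then some 5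
  else if 'a' ≤ c ∧ c ≤ 'z' then some 2
  else none

-- second loop of Source B: over freq.items(), accumulating w * n, early 0 on an invalid key
def puntosItems : Int → List (Char × Int) → Int
  | t, [] => t
  | t, (c, n) :: rest =>
      match puntosWeight c with
      | some w => puntosItems (t + w * n) rest
      | none => 0

def puntos_alt (candidata : String) : Int :=
  let l := (PySem.Str.lower candidata).toList
  let freq := l.foldl (fun d c => d.insert c (d.getD c 0 + 1)) PySem.Dict.empty
  puntosItems 0 freq.items

-- ===== PRECONDITION & SPEC =====
def Spec_puntos (candidata : String) (out : Int) : Prop := out = puntos_alt candidata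
instance (candidata : String) (out : Int) : Decidable (Spec_puntos candidata out) := by unfold Spec_puntos; infer_instance

-- ===== CLAIM (what is proved, stated in full; the proofs are below) =====
def Claim_equal_puntos : Prop := ∀ (candidata : String), Dom_puntos candidata → Spec_puntos candidata (puntos candidata)

-- ===== LEMMAS AND PROOFS =====
-- total per-character weight used to relate the two programs on valid letters
def pesoTotal (c : Char) : Int :=
  if c ∈ ['a', 'e', 'i', 'o', 'u'] then 1
  else if c ∈ ['j', 'k', 'q', 'w', 'x', 'y', 'z'] then 5
  else 2

theorem puntosLoop1_none_iff (l : List Char) :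
    puntosLoop1 l = none ↔ l.all (fun c => 'a' ≤ c && c ≤ 'z') = true := by
  induction l with
  | nil => simp [puntosLoop1]
  | cons c rest ih =>
      by_cases h : c < 'a' ∨ c > 'z'
      · simp only [puntosLoop1, if_pos h, List.all_cons]
        constructor
        · intro hc; exact absurd hc (by simp)
        · intro hc
          rcases h with h | h
          · simp only [Bool.and_eq_true, decide_eq_true_eq] at hc
            exact absurd hc.1.1 (not_le.mpr h)
          · simp only [Bool.and_eq_true, decide_eq_true_eq] at hc
            exact absurd hc.1.2 (not_le.mpr h)
      · rcases not_or.mp h with ⟨h1, h2⟩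
        rw [puntosLoop1, if_neg h]
        simp [List.all_cons, ih, not_lt.mp h1, not_lt.mp h2]

theorem puntosLoop1_some (l : List Char) (r : Int) :
    puntosLoop1 l = some r → r = 0 := by
  induction l with
  | nil => simp [puntosLoop1]
  | cons c rest ih =>
      simp only [puntosLoop1]
      split_ifs with h
      · intro hs; exact (Option.some_inj.mp hs).symm
      · exact ih

theorem puntosLoop2_eq (l : List Char) (p : Int) :
    puntosLoop2 p l = p + (l.map pesoTotal).sum := by
  induction l generalizing p with
  | nil => simp [puntosLoop2]
  | cons c rest ih =>
      simp only [puntosLoop2, List.map_cons, List.sum_cons, pesoTotal]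
      split_ifs with hv hh <;> rw [ih] <;> ring

theorem puntosWeight_valid (c : Char) (h1 : 'a' ≤ c) (h2 : c ≤ 'z') :
    puntosWeight c = some (pesoTotal c) := by
  unfold puntosWeight pesoTotal
  split_ifs with hv hh hr
  · rfl
  · rfl
  · rfl
  · exact (hr ⟨h1, h2⟩).elim

theorem puntosWeight_invalid (c : Char) (h : ¬('a' ≤ c ∧ c ≤ 'z')) :
    puntosWeight c = none := by
  unfold puntosWeight
  split_ifs with hv hh
  · exact absurd (by fin_cases hv <;> decide) h
  · exact absurd (by fin_cases hh <;> decide) h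
  · rfl

theorem puntosItems_invalid (ps : List (Char × Int)) (t : Int)
    (h : ∃ p ∈ ps, puntosWeight p.1 = none) : puntosItems t ps = 0 := by
  induction ps generalizing t with
  | nil => simp at h
  | cons p rest ih =>
      obtain ⟨q, hq, hqn⟩ := h
      obtain ⟨c, n⟩ := p
      rcases List.mem_cons.mp hq with rfl | hq'
      · simp only [puntosItems, hqn]
      · cases hw : puntosWeight c with
        | none => simp only [puntosItems, hw]
        | some w => simp only [puntosItems, hw]; exact ih _ ⟨q, hq', hqn⟩

theorem puntosItems_valid (ps : List (Char × Int)) (t : Int)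
    (h : ∀ p ∈ ps, 'a' ≤ p.1 ∧ p.1 ≤ 'z') :
    puntosItems t ps = t + (ps.map (fun p => pesoTotal p.1 * p.2)).sum := by
  induction ps generalizing t with
  | nil => simp [puntosItems]
  | cons p rest ih =>
      obtain ⟨c, n⟩ := p
      have hc := h (c, n) (List.mem_cons_self ..)
      simp only [puntosItems, puntosWeight_valid c hc.1 hc.2]
      rw [ih _ (fun q hq => h q (List.mem_cons_of_mem _ hq))]
      simp only [List.map_cons, List.sum_cons]
      ring

-- sum over distinct letters (with multiplicity) = per-character sum
theorem distinct_sum_eq (l : List Char) :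
    ((PySem.Set.ofList l).map (fun k => pesoTotal k * (l.count k : Int))).sum
      = (l.map pesoTotal).sum := by
  have hnd : (PySem.Set.ofList l).Nodup := PySem.Set.nodup_ofList l
  have hfin : (PySem.Set.ofList l).toFinset = l.toFinset := by
    ext x; simp [List.mem_toFinset, PySem.Set.mem_ofList]
  rw [← List.sum_toFinset _ hnd, hfin, Finset.sum_list_map_count]
  apply Finset.sum_congr rfl
  intro x _
  simp [mul_comm]

-- ===== VERDICT (by name: the statement is the Claim_ definition above) =====
theorem puntos_spec : Claim_equal_puntos := by
  intro candidata _
  unfold Spec_puntos puntos puntos_alt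
  set l := (PySem.Str.lower candidata).toList with hl
  show (match puntosLoop1 l with | some r => r | none => puntosLoop2 0 l)
      = puntosItems 0 (PySem.Dict.counter l).items
  rw [PySem.Dict.items_counter]
  by_cases h : l.all (fun c => 'a' ≤ c && c ≤ 'z') = true
  · rw [(puntosLoop1_none_iff l).mpr h]
    have hv : ∀ p ∈ (PySem.Set.ofList l).map (fun k => (k, (l.count k : Int))),
        'a' ≤ p.1 ∧ p.1 ≤ 'z' := by
      intro p hp
      obtain ⟨k, hk, rfl⟩ := List.mem_map.mp hp
      have := List.all_eq_true.mp h k ((PySem.Set.mem_ofList ..).mp hk)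
      simpa using this
    rw [puntosLoop2_eq, puntosItems_valid _ _ hv, List.map_map]
    simp only [Function.comp_def]
    rw [distinct_sum_eq]
  · cases ho : puntosLoop1 l with
    | none => exact absurd ((puntosLoop1_none_iff l).mp ho) h
    | some r =>
        rw [puntosLoop1_some l r ho]
        refine (puntosItems_invalid _ _ ?_).symm
        simp only [List.all_eq_true] at h
        push Not at h
        obtain ⟨c, hc, hcv⟩ := h
        refine ⟨(c, (l.count c : Int)), List.mem_map.mpr ⟨c, (PySem.Set.mem_ofList ..).mpr hc, rfl⟩, ?_⟩
        apply puntosWeight_invalid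
        simpa using hcv
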